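-- pv_equiv track=rewrite | github.com/MrBrantCode/unitest_baseline | mut_generate/mist_train_cf/cf_75521/solution.py | second_smallest_odd_element
-- ===== SOURCE A (Python) =====
-- def second_smallest_odd_element(lst: list):
--     min1 = min2 = float('Inf')
--     for x in lst:
--         if x % 2 != 0:
--             if x <= min1:
--                 if x < min1:
--                     min2 = min1
--                 min1 = x
--             elif x < min2:
--                 min2 = x
--     return min2 if min2 < float('Inf') else None
-- ===== SOURCE B (Python) =====
-- def second_smallest_odd_element(lst: list):
--     odds = sorted(set(x for x in lst if x % 2 != 0))
--     return odds[1] if len(odds) >= 2 else None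
-- ===== Notes on version B (the rewrite author's own statement) =====
-- stated objective: simpler
-- what changed: Replaces the single-pass two-running-minima scan (with an infinity sentinel and nested comparisons) by building the deduplicated set of odd values, sorting it, and returning its second element.
import Mathlib
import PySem

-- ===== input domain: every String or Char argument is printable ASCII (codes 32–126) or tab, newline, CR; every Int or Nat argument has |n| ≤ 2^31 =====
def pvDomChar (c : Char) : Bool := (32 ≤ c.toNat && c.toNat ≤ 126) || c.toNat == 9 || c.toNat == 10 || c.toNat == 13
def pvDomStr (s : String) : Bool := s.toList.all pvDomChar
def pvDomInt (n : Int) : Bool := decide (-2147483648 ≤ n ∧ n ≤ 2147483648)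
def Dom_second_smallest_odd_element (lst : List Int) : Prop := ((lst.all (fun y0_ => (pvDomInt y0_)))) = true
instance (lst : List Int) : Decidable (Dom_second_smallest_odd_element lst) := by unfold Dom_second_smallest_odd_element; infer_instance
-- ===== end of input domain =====

-- B replaces A's one-pass two-running-minima scan by sort-the-set-of-odds-and-take-element-1 (simpler; same return values).

-- ===== PORT A =====
-- A's sentinel float('Inf') is modelled exactly by `none` in `Option Int`: no integer equals it,
-- `x <= Inf` and `x < Inf` are true, `Inf < Inf` is false, and `min2 < Inf` iff min2 ≠ Inf.
def pvLeInf (x : Int) (m : Option Int) : Bool :=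
  match m with | none => true | some a => decide (x ≤ a)
def pvLtInf (x : Int) (m : Option Int) : Bool :=
  match m with | none => true | some a => decide (x < a)
def pvStepA (st : Option Int × Option Int) (x : Int) : Option Int × Option Int :=
  if PySem.Int.mod x 2 != 0 then
    if pvLeInf x st.1 then
      (some x, if pvLtInf x st.1 then st.1 else st.2)
    else if pvLtInf x st.2 then (st.1, some x)
    else st
  else st

def second_smallest_odd_element (lst : List Int) : Option Int :=
  -- `return min2 if min2 < float('Inf') else None` is the identity under the Option representation
  (lst.foldl pvStepA (none, none)).2

-- ===== PORT B =====
def second_smallest_odd_element_alt (lst : List Int) : Option Int :=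
  let odds := PySem.List.sorted (PySem.Set.ofList (lst.filter (fun x => PySem.Int.mod x 2 != 0))) (fun x => x) false
  if h : 2 ≤ odds.length then some odds[1] else none

-- ===== PRECONDITION & SPEC =====
def Spec_second_smallest_odd_element (lst : List Int) (out : Option Int) : Prop := out = second_smallest_odd_element_alt lst
instance (lst : List Int) (out : Option Int) : Decidable (Spec_second_smallest_odd_element lst out) := by unfold Spec_second_smallest_odd_element; infer_instance

-- ===== CLAIM (what is proved, stated in full; the proofs are below) =====
def Claim_equal_second_smallest_odd_element : Prop := ∀ (lst : List Int), Dom_second_smallest_odd_element lst → Spec_second_smallest_odd_element lst (second_smallest_odd_element lst)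

-- ===== LEMMAS AND PROOFS =====

-- the sorted deduplicated odd values of lst
def pvOdds (lst : List Int) : List Int :=
  PySem.List.sorted (PySem.Set.ofList (lst.filter (fun x => PySem.Int.mod x 2 != 0))) (fun x => x) false

lemma pvOdds_pairwise (lst : List Int) : (pvOdds lst).Pairwise (· < ·) :=
  PySem.List.sorted_ofList_pairwise_lt _

lemma pvMem_odds (lst : List Int) (x : Int) :
    x ∈ pvOdds lst ↔ x ∈ lst ∧ (PySem.Int.mod x 2 != 0) = true := by
  simp [pvOdds, PySem.List.mem_sorted, PySem.Set.mem_ofList, List.mem_filter]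

lemma pvInsertBy_perm (x : Int) (u : List Int) (before : Int → Int → Bool) :
    (PySem.List.insertBy before x u).Perm (x :: u) := by
  induction u with
  | nil => simp [PySem.List.insertBy]
  | cons a t ih =>
    by_cases h : before x a = true
    · simp [PySem.List.insertBy, h]
    · simp only [PySem.List.insertBy]
      rw [if_neg h]
      exact (List.Perm.cons a ih).trans (List.Perm.swap x a t)

lemma pvInsertBy_pairwise (x : Int) (u : List Int) (hp : u.Pairwise (· < ·)) (hx : x ∉ u) :
    (PySem.List.insertBy (fun a b => decide (a < b)) x u).Pairwise (· < ·) := by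
  induction u with
  | nil => simp [PySem.List.insertBy]
  | cons a t ih =>
    rcases List.pairwise_cons.mp hp with ⟨ha, hpt⟩
    by_cases h : x < a
    · simp only [PySem.List.insertBy, decide_eq_true_eq, if_pos h]
      exact List.pairwise_cons.mpr ⟨by
        intro y hy
        rcases List.mem_cons.mp hy with rfl | hyt
        · exact h
        · exact h.trans (ha y hyt), hp⟩
    · have hax : a < x := by
        rcases lt_trichotomy x a with h' | h' | h'
        · exact absurd h' h
        · exact absurd h' (by intro he; exact hx (he ▸ List.mem_cons_self))
        · exact h'
      simp only [PySem.List.insertBy, decide_eq_true_eq, if_neg h]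
      refine List.pairwise_cons.mpr ⟨?_, ih hpt (fun hm => hx (List.mem_cons_of_mem a hm))⟩
      intro y hy
      rcases (PySem.List.mem_insertBy _ _ _ _).mp hy with rfl | hyt
      · exact hax
      · exact ha y hyt

-- even elements leave the state unchanged
lemma pvStepA_even (st : Option Int × Option Int) (x : Int)
    (hx : (PySem.Int.mod x 2 != 0) = false) : pvStepA st x = st := by
  unfold pvStepA
  rw [hx]
  simp

-- one unfolding of A's step on an odd element
lemma pvStepA_odd (st : Option Int × Option Int) (x : Int)
    (hodd : (PySem.Int.mod x 2 != 0) = true) :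
    pvStepA st x =
      (if pvLeInf x st.1 then (some x, if pvLtInf x st.1 then st.1 else st.2)
       else if pvLtInf x st.2 then (st.1, some x) else st) := by
  unfold pvStepA
  rw [hodd]
  simp

-- an odd value already among the seen distinct odds leaves the state unchanged
lemma pvStepA_mem (u : List Int) (x : Int) (hp : u.Pairwise (· < ·)) (hx : x ∈ u)
    (hodd : (PySem.Int.mod x 2 != 0) = true) :
    pvStepA (u[0]?, u[1]?) x = (u[0]?, u[1]?) := by
  cases u with
  | nil => cases hx
  | cons a t =>
    rcases List.pairwise_cons.mp hp with ⟨ha, hpt⟩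
    rw [pvStepA_odd _ _ hodd]
    rcases List.mem_cons.mp hx with rfl | hxt
    · simp [pvLeInf, pvLtInf]
    · have hax : a < x := ha x hxt
      cases t with
      | nil => cases hxt
      | cons b t' =>
        rcases List.pairwise_cons.mp hpt with ⟨hb, _⟩
        have hbx : b ≤ x := by
          rcases List.mem_cons.mp hxt with rfl | hxt'
          · exact le_refl _
          · exact le_of_lt (hb x hxt')
        simp [pvLeInf, pvLtInf, not_lt.mpr hbx, not_le.mpr hax]

-- inserting a new odd value updates the first two elements exactly as A's branch cascade does
lemma pvStepA_insert (u : List Int) (x : Int) (hp : u.Pairwise (· < ·)) (hx : x ∉ u)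
    (hodd : (PySem.Int.mod x 2 != 0) = true) :
    pvStepA (u[0]?, u[1]?) x =
      ((PySem.List.insertBy (fun a b => decide (a < b)) x u)[0]?,
       (PySem.List.insertBy (fun a b => decide (a < b)) x u)[1]?) := by
  rw [pvStepA_odd _ _ hodd]
  cases u with
  | nil => simp [pvLeInf, pvLtInf, PySem.List.insertBy]
  | cons a t =>
    have hxa : x ≠ a := fun he => hx (he ▸ List.mem_cons_self)
    by_cases h1 : x < a
    · simp [pvLeInf, pvLtInf, le_of_lt h1, h1, PySem.List.insertBy]
    · have hax : a < x := lt_of_le_of_ne (not_lt.mp h1) (Ne.symm hxa)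
      cases t with
      | nil =>
        simp [pvLeInf, pvLtInf, not_le.mpr hax, PySem.List.insertBy, h1]
      | cons b t' =>
        have hxb : x ≠ b := fun he => hx (he ▸ List.mem_cons_of_mem a List.mem_cons_self)
        by_cases h2 : x < b
        · simp [pvLeInf, pvLtInf, not_le.mpr hax, h2, PySem.List.insertBy, h1]
        · simp [pvLeInf, pvLtInf, not_le.mpr hax, h2, PySem.List.insertBy, h1]

-- appending one element to the input: how the sorted distinct odds evolve
lemma pvOdds_append (lst : List Int) (x : Int) :
    pvOdds (lst ++ [x]) =
      if (PySem.Int.mod x 2 != 0) = true then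
        (if x ∈ pvOdds lst then pvOdds lst
         else PySem.List.insertBy (fun a b => decide (a < b)) x (pvOdds lst))
      else pvOdds lst := by
  by_cases hodd : (PySem.Int.mod x 2 != 0) = true
  · have hodd' : x % 2 = 1 := by
      have h := hodd
      rw [PySem.Int.mod_eq_emod_of_pos (by norm_num : (0:Int) < 2)] at h
      simp only [bne_iff_ne, ne_eq] at h
      omega
    rw [if_pos hodd]
    have hfil : (lst ++ [x]).filter (fun y => PySem.Int.mod y 2 != 0) =
        lst.filter (fun y => PySem.Int.mod y 2 != 0) ++ [x] := by
      rw [List.filter_append]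
      simp [hodd']
    have hadd : PySem.Set.ofList ((lst ++ [x]).filter (fun y => PySem.Int.mod y 2 != 0)) =
        PySem.Set.add (PySem.Set.ofList (lst.filter (fun y => PySem.Int.mod y 2 != 0))) x := by
      rw [hfil]
      simp only [PySem.Set.ofList, List.foldl_append, List.foldl_cons, List.foldl_nil]
    by_cases hmem : x ∈ pvOdds lst
    · rw [if_pos hmem]
      have hxin : x ∈ PySem.Set.ofList (lst.filter (fun y => PySem.Int.mod y 2 != 0)) := by
        rcases (pvMem_odds lst x).mp hmem with ⟨h1, h2⟩
        exact (PySem.Set.mem_ofList _ _).mpr (List.mem_filter.mpr ⟨h1, h2⟩)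
      rcases (pvMem_odds lst x).mp hmem with ⟨hin, -⟩
      show PySem.List.sorted _ _ _ = PySem.List.sorted _ _ _
      rw [hadd]
      congr 1
      simp [PySem.Set.add, hin, hodd']
    · rw [if_neg hmem]
      have hxout : x ∉ PySem.Set.ofList (lst.filter (fun y => PySem.Int.mod y 2 != 0)) := by
        intro hc
        rcases List.mem_filter.mp ((PySem.Set.mem_ofList _ _).mp hc) with ⟨h1, h2⟩
        exact hmem ((pvMem_odds lst x).mpr ⟨h1, h2⟩)
      have hnl : x ∉ lst := fun hl => hmem ((pvMem_odds lst x).mpr ⟨hl, hodd⟩)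
      have hset : PySem.Set.ofList ((lst ++ [x]).filter (fun y => PySem.Int.mod y 2 != 0)) =
          PySem.Set.ofList (lst.filter (fun y => PySem.Int.mod y 2 != 0)) ++ [x] := by
        rw [hadd]
        simp [PySem.Set.add, hnl]
      have hperm : (PySem.List.insertBy (fun a b => decide (a < b)) x (pvOdds lst)).Perm
          (PySem.Set.ofList (lst.filter (fun y => PySem.Int.mod y 2 != 0)) ++ [x]) := by
        refine (pvInsertBy_perm x (pvOdds lst) _).trans ?_
        refine List.Perm.trans ?_ (List.perm_append_singleton x _).symm
        exact List.Perm.cons x (PySem.List.sorted_perm _ _ _)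
      have hpair := pvInsertBy_pairwise x (pvOdds lst) (pvOdds_pairwise lst) hmem
      show PySem.List.sorted _ _ _ = _
      rw [hset]
      exact PySem.List.sorted_eq_of_perm_of_pairwise_lt _ _ _ hperm hpair
  · have heven : (2:Int) ∣ x := by
      have h := Bool.not_eq_true _ ▸ hodd
      rw [PySem.Int.mod_eq_emod_of_pos (by norm_num : (0:Int) < 2)] at h
      simp only [bne_eq_false_iff_eq] at h
      omega
    rw [if_neg hodd]
    have hfil : (lst ++ [x]).filter (fun y => PySem.Int.mod y 2 != 0) =
        lst.filter (fun y => PySem.Int.mod y 2 != 0) := by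
      rw [List.filter_append]
      simp [heven]
    show PySem.List.sorted _ _ _ = pvOdds lst
    rw [hfil]
    rfl

-- loop invariant: A's fold state is exactly the first two of the sorted distinct odds
lemma pvFold_eq (lst : List Int) :
    lst.foldl pvStepA (none, none) = ((pvOdds lst)[0]?, (pvOdds lst)[1]?) := by
  induction lst using List.reverseRecOn with
  | nil => simp [pvOdds, PySem.Set.ofList, PySem.Set.empty, PySem.List.sorted]
  | append_singleton lst x ih =>
    rw [List.foldl_append, List.foldl_cons, List.foldl_nil, ih, pvOdds_append]
    by_cases hodd : (PySem.Int.mod x 2 != 0) = true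
    · rw [if_pos hodd]
      by_cases hmem : x ∈ pvOdds lst
      · rw [if_pos hmem, pvStepA_mem _ _ (pvOdds_pairwise lst) hmem hodd]
      · rw [if_neg hmem, pvStepA_insert _ _ (pvOdds_pairwise lst) hmem hodd]
    · rw [if_neg hodd, pvStepA_even _ _ (Bool.not_eq_true _ ▸ hodd)]

-- B's guarded index is the optional second element
lemma pvAlt_eq (lst : List Int) : second_smallest_odd_element_alt lst = (pvOdds lst)[1]? := by
  show (if h : 2 ≤ (pvOdds lst).length then some (pvOdds lst)[1] else none) = _
  by_cases h : 2 ≤ (pvOdds lst).length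
  · rw [dif_pos h, List.getElem?_eq_getElem (by omega)]
    rfl
  · rw [dif_neg h, List.getElem?_eq_none (by omega)]

-- ===== VERDICT (by name: the statement is the Claim_ definition above) =====
theorem second_smallest_odd_element_spec : Claim_equal_second_smallest_odd_element := by
  intro lst _
  show (lst.foldl pvStepA (none, none)).2 = _
  rw [pvFold_eq, pvAlt_eq]
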